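-- pv_equiv track=rewrite | github.com/herohuyongtao/deeptag-pytorch | fiducial_marker/unit_chessboard_tag.py | get_ordered_idx_list
-- ===== SOURCE A (Python) =====
-- def get_ordered_idx_list(grid_size, main_idx = 0, step_elem_num = 1):
--     # get ordered template
--     idx_list = []
--     for ii in range(0, grid_size, step_elem_num):
--         for jj in range(0, grid_size, step_elem_num):
--             if main_idx ==0:
--                 idx = ii * grid_size + jj
--             elif main_idx ==1:
--                 idx = jj * grid_size + (grid_size - ii -1)
--             elif main_idx ==2:
--                 idx = (grid_size - ii - 1)*grid_size + (grid_size - jj -1)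
--             elif main_idx ==3:
--                 idx = (grid_size - jj -1)*grid_size + ii
--
--             idx_list.append(idx)
--     return idx_list
-- ===== SOURCE B (Python) =====
-- def get_ordered_idx_list(grid_size, main_idx=0, step_elem_num=1):
--     # The index of cell (ii, jj) is a sum R(ii) + C(jj) of two affine forms.
--     # Start from the unrotated board's forms and rotate the pair of forms
--     # main_idx times (a 90-degree rotation maps (i, j) -> (j, g-1-i)), then
--     # tabulate each axis once and combine with plain additions.
--     g = grid_size
--     coords = range(0, g, step_elem_num)
--     row, col = (g, 0), (1, 0)
--     for _ in range(main_idx % 4):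
--         a, b = col
--         row, col = (-a, a * (g - 1) + b), row
--     rows = [row[0] * i + row[1] for i in coords]
--     cols = [col[0] * j + col[1] for j in coords]
--     return [r + c for r in rows for c in cols]
-- ===== Notes on version B (the rewrite author's own statement) =====
-- stated objective: faster
-- what changed: B represents the cell index as a sum of two affine axis forms R(i)+C(j), rotates that pair of forms main_idx%4 times instead of branching per cell, tabulates each axis once and combines the two tables with plain additions.
import Mathlib
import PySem

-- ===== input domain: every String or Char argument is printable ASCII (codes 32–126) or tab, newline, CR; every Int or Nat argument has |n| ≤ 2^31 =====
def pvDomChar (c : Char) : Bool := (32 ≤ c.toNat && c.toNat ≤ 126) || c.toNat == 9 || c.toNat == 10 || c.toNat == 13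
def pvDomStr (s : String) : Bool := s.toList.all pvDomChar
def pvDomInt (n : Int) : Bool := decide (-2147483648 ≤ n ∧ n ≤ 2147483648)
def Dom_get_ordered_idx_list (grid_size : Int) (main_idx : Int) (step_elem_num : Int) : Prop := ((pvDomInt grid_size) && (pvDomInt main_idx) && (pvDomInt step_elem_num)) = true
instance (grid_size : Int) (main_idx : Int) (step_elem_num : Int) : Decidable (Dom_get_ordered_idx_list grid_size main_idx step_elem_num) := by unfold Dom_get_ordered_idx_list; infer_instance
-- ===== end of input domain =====

-- B writes the cell index as a sum of two affine axis forms, rotates that pair of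
-- forms main_idx times, tabulates each axis once and combines with additions
-- (objective: faster, constant factor).

-- ===== PORT A =====
def get_ordered_idx_list (grid_size : Int) (main_idx : Int) (step_elem_num : Int) : List Int :=
  (PySem.List.pyRange 0 grid_size step_elem_num).foldl (fun idx_list ii =>
    (PySem.List.pyRange 0 grid_size step_elem_num).foldl (fun idx_list jj =>
      let idx : Int :=
        if main_idx = 0 then ii * grid_size + jj
        else if main_idx = 1 then jj * grid_size + (grid_size - ii - 1)
        else if main_idx = 2 then (grid_size - ii - 1) * grid_size + (grid_size - jj - 1)
        else if main_idx = 3 then (grid_size - jj - 1) * grid_size + ii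
        else 0  -- Python raises UnboundLocalError here; excluded by Pre_
      idx_list ++ [idx]) idx_list) []

-- ===== PORT B =====
def get_ordered_idx_list_alt (grid_size : Int) (main_idx : Int) (step_elem_num : Int) : List Int :=
  let coords := PySem.List.pyRange 0 grid_size step_elem_num
  let rc := (List.range (PySem.Int.mod main_idx 4).toNat).foldl
      (fun rc _ => ((-(rc.2.1), rc.2.1 * (grid_size - 1) + rc.2.2), rc.1))
      ((grid_size, 0), (1, 0))
  let rows := coords.map (fun i => rc.1.1 * i + rc.1.2)
  let cols := coords.map (fun j => rc.2.1 * j + rc.2.2)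
  rows.flatMap (fun r => cols.map (fun c => r + c))

-- ===== PRECONDITION & SPEC =====
-- Pre_ excludes inputs where Python A raises: step 0 (ValueError), and a main_idx
-- outside {0,1,2,3} when the loop body runs (UnboundLocalError).
def Pre_get_ordered_idx_list (grid_size : Int) (main_idx : Int) (step_elem_num : Int) : Prop :=
  step_elem_num ≠ 0 ∧
    (main_idx = 0 ∨ main_idx = 1 ∨ main_idx = 2 ∨ main_idx = 3 ∨
      ¬ ((0 < grid_size ∧ 0 < step_elem_num) ∨ (grid_size < 0 ∧ step_elem_num < 0)))
instance (grid_size : Int) (main_idx : Int) (step_elem_num : Int) : Decidable (Pre_get_ordered_idx_list grid_size main_idx step_elem_num) := by unfold Pre_get_ordered_idx_list; infer_instance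

def pvWitness_get_ordered_idx_list : Int × Int × Int := (3, 1, 1)

def Spec_get_ordered_idx_list (grid_size : Int) (main_idx : Int) (step_elem_num : Int) (out : List Int) : Prop := out = get_ordered_idx_list_alt grid_size main_idx step_elem_num
instance (grid_size : Int) (main_idx : Int) (step_elem_num : Int) (out : List Int) : Decidable (Spec_get_ordered_idx_list grid_size main_idx step_elem_num out) := by unfold Spec_get_ordered_idx_list; infer_instance

-- ===== CLAIM (what is proved, stated in full; the proofs are below) =====
def Claim_equal_get_ordered_idx_list : Prop := ∀ (grid_size : Int) (main_idx : Int) (step_elem_num : Int), Dom_get_ordered_idx_list grid_size main_idx step_elem_num → Pre_get_ordered_idx_list grid_size main_idx step_elem_num → Spec_get_ordered_idx_list grid_size main_idx step_elem_num (get_ordered_idx_list grid_size main_idx step_elem_num)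

-- ===== LEMMAS AND PROOFS =====

-- A as a flatMap of maps (loop-shape lemmas).
theorem portA_eq_flatMap (g m s : Int) :
    get_ordered_idx_list g m s =
      (PySem.List.pyRange 0 g s).flatMap (fun ii =>
        (PySem.List.pyRange 0 g s).map (fun jj =>
          if m = 0 then ii * g + jj
          else if m = 1 then jj * g + (g - ii - 1)
          else if m = 2 then (g - ii - 1) * g + (g - jj - 1)
          else if m = 3 then (g - jj - 1) * g + ii
          else 0)) := by
  unfold get_ordered_idx_list
  simp only [PySem.List.foldl_append_singleton_eq_map, PySem.List.foldl_append_eq_flatMap,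
    List.nil_append]

-- range(0, g, s) is empty when the loop would not run.
theorem pyRange_empty (g s : Int)
    (h : ¬ ((0 < g ∧ 0 < s) ∨ (g < 0 ∧ s < 0))) :
    PySem.List.pyRange 0 g s = [] := by
  unfold PySem.List.pyRange
  split_ifs with h0 h1 h2 h3 <;> simp_all
  omega

theorem get_ordered_idx_list_spec : Claim_equal_get_ordered_idx_list := by
  intro g m s _ hpre
  unfold Spec_get_ordered_idx_list
  obtain ⟨hs, hm⟩ := hpre
  rw [portA_eq_flatMap]
  unfold get_ordered_idx_list_alt
  rcases hm with h | h | h | h | h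
  · subst h
    norm_num [PySem.Int.mod, Int.fmod, show ((2:Int).toNat = 2) from rfl,
      show ((3:Int).toNat = 3) from rfl, List.range_succ, List.foldl_cons, List.foldl_nil,
      List.flatMap_map, List.map_map, Function.comp_def]
    try (congr 1; funext ii; congr 1; funext jj; ring)
  · subst h
    norm_num [PySem.Int.mod, Int.fmod, show ((2:Int).toNat = 2) from rfl,
      show ((3:Int).toNat = 3) from rfl, List.range_succ, List.foldl_cons, List.foldl_nil,
      List.flatMap_map, List.map_map, Function.comp_def]
    try (congr 1; funext ii; congr 1; funext jj; ring)
  · subst h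
    norm_num [PySem.Int.mod, Int.fmod, show ((2:Int).toNat = 2) from rfl,
      show ((3:Int).toNat = 3) from rfl, List.range_succ, List.foldl_cons, List.foldl_nil,
      List.flatMap_map, List.map_map, Function.comp_def]
    try (congr 1; funext ii; congr 1; funext jj; ring)
  · subst h
    norm_num [PySem.Int.mod, Int.fmod, show ((2:Int).toNat = 2) from rfl,
      show ((3:Int).toNat = 3) from rfl, List.range_succ, List.foldl_cons, List.foldl_nil,
      List.flatMap_map, List.map_map, Function.comp_def]
    try (congr 1; funext ii; congr 1; funext jj; ring)
  · rw [pyRange_empty g s h]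
    simp
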